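-- pv_equiv track=rewrite | github.com/SE-GUC/Task1-ENG-15 | Desktop/Opt/app.py | fixArray
-- ===== SOURCE A (Python) =====
-- def fixArray(array1):
--     array2 = []
--     temp = []
--     for elem in array1:
--         if elem == -1:
--             array2.append(temp)
--             temp = []
--         else:
--             if elem != -2:
--                 temp.append(elem)
--     return array2
-- ===== SOURCE B (Python) =====
-- def fixArray(array1):
--     filtered = [x for x in array1 if x != -2]
--     result = []
--     start = 0
--     for i, x in enumerate(filtered):
--         if x == -1:
--             result.append(filtered[start:i])
--             start = i + 1
--     return result
-- ===== Notes on version B (the rewrite author's own statement) =====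
-- stated objective: alternative
-- what changed: B first filters out the -2 markers, then scans once over the filtered list collecting separator indices and emits each group as an index slice filtered[start:i], instead of A's element-by-element accumulation of a temp list.
import Mathlib
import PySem

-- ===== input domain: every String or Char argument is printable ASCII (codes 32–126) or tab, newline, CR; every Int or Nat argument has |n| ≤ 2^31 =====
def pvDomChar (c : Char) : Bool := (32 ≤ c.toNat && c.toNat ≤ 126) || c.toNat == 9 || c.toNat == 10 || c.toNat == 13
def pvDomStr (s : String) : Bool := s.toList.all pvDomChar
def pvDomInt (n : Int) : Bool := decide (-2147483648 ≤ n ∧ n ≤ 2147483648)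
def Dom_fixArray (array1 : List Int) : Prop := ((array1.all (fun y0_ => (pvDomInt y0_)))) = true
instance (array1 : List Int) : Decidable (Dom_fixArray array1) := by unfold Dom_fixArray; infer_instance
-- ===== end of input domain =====

-- B filters out the -2 markers first, then scans once collecting separator indices and
-- emits each group as an index slice filtered[start:i] — alternative decomposition, same cost.

-- ===== PORT A =====
-- A's loop body: state is (array2, temp)
def fixStepA (st : List (List Int) × List Int) (elem : Int) : List (List Int) × List Int :=
  if elem = -1 then (st.1 ++ [st.2], [])
  else if elem ≠ -2 then (st.1, st.2 ++ [elem]) else st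

def fixArray (array1 : List Int) : List (List Int) :=
  (array1.foldl fixStepA ([], [])).1

-- ===== PORT B =====
-- B's loop body over enumerate(filtered): state is (result, start)
def fixStepB (filtered : List Int) (st : List (List Int) × Int) (p : Int × Int) :
    List (List Int) × Int :=
  if p.2 = -1 then (st.1 ++ [PySem.List.slice filtered (some st.2) (some p.1)], p.1 + 1)
  else st

def fixArray_alt (array1 : List Int) : List (List Int) :=
  let filtered := array1.filter (fun x => x ≠ -2)
  ((PySem.List.enumerate filtered 0).foldl (fixStepB filtered) ([], 0)).1

-- ===== PRECONDITION & SPEC =====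
def Spec_fixArray (array1 : List Int) (out : List (List Int)) : Prop := out = fixArray_alt array1
instance (array1 : List Int) (out : List (List Int)) : Decidable (Spec_fixArray array1 out) := by unfold Spec_fixArray; infer_instance

-- ===== CLAIM (what is proved, stated in full; the proofs are below) =====
def Claim_equal_fixArray : Prop := ∀ (array1 : List Int), Dom_fixArray array1 → Spec_fixArray array1 (fixArray array1)

-- ===== LEMMAS AND PROOFS =====

-- A's fold ignores the -2 elements, so it equals the same fold over the filtered list.
lemma foldA_filter (l : List Int) : ∀ st : List (List Int) × List Int,
    l.foldl fixStepA st = (l.filter (fun x => x ≠ -2)).foldl fixStepA st := by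
  induction l with
  | nil => intro st; rfl
  | cons x xs ih =>
    intro st
    by_cases hx : x = -2
    · subst hx
      simp [List.foldl_cons, fixStepA, ih]
    · simp [List.foldl_cons, hx, ih]

-- Loop invariant relating B's index-slicing scan of a -2-free list to A's temp-accumulating fold.
lemma fixB_inv (full : List Int) : ∀ (rest pre : List Int) (res : List (List Int)) (start : Nat),
    full = pre ++ rest → start ≤ pre.length → (∀ x ∈ rest, x ≠ -2) →
    ((PySem.List.enumerate rest (pre.length : Int)).foldl (fixStepB full)
        (res, (start : Int))).1
      = (rest.foldl fixStepA (res, pre.drop start)).1 := by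
  intro rest
  induction rest with
  | nil => intro pre res start _ _ _; rfl
  | cons x xs ih =>
    intro pre res start hfull hstart hne
    rw [PySem.List.enumerate_cons]
    by_cases hx : x = -1
    · subst hx
      have hslice : PySem.List.slice full (some (start : Int)) (some (pre.length : Int))
          = pre.drop start := by
        rw [PySem.List.slice_natCast, hfull, List.drop_append_of_le_length hstart]
        rw [List.take_append_of_le_length (by simp [List.length_drop])]
        simp
      have h1 : ((pre.length : Int) + 1) = ((pre ++ [(-1 : Int)]).length : Int) := by
        simp
      simp only [List.foldl_cons, fixStepB, fixStepA, hslice]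
      rw [h1]
      have := ih (pre ++ [(-1 : Int)]) (res ++ [pre.drop start]) (pre ++ [(-1 : Int)]).length
        (by simpa using hfull) (le_refl _) (fun y hy => hne y (List.mem_cons_of_mem _ hy))
      simpa using this
    · have hx2 : x ≠ -2 := hne x List.mem_cons_self
      have h1 : ((pre.length : Int) + 1) = ((pre ++ [x]).length : Int) := by simp
      simp only [List.foldl_cons, fixStepB, fixStepA, if_neg hx, if_pos hx2]
      rw [h1]
      have := ih (pre ++ [x]) res start
        (by simpa using hfull) (le_trans hstart (by simp))
        (fun y hy => hne y (List.mem_cons_of_mem _ hy))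
      rw [this]
      rw [List.drop_append_of_le_length hstart]

-- ===== VERDICT (by name: the statement is the Claim_ definition above) =====
theorem fixArray_spec : Claim_equal_fixArray := by
  intro array1 _
  unfold Spec_fixArray fixArray fixArray_alt
  rw [foldA_filter]
  have := fixB_inv (array1.filter (fun x => x ≠ -2)) (array1.filter (fun x => x ≠ -2)) [] [] 0
    (by simp) (by simp)
    (fun y hy => by
      have := List.mem_filter.mp hy
      simpa using this.2)
  simpa using this.symm
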